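-- pv_equiv track=rewrite | github.com/ShuyinOuyang/DS_bench | benchmark_construction/dataset_generation.py | add_matplotlib_agg
-- ===== SOURCE A (Python) =====
-- def add_matplotlib_agg(code):
--     lines = code.splitlines()
--     result = []
--     added_agg = False
--
--     for line in lines:
--         result.append(line)
--         if 'matplotlib' in line and 'import' in line and (not added_agg):
--             result.append("import matplotlib\nmatplotlib.use('Agg')")
--             added_agg = True
--
--     return '\n'.join(result)
-- ===== SOURCE B (Python) =====
-- AGG = "import matplotlib\nmatplotlib.use('Agg')"
--
--
-- def add_matplotlib_agg(code):
--     def go(lines):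
--         # Build the output string directly by recursion; no result list, no flag.
--         if not lines:
--             return ''
--         head, tail = lines[0], lines[1:]
--         if 'matplotlib' in head and 'import' in head:
--             out = head + '\n' + AGG
--             if tail:
--                 out += '\n' + '\n'.join(tail)
--             return out
--         if tail:
--             return head + '\n' + go(tail)
--         return head
--
--     return go(code.splitlines())
-- ===== Notes on version B (the rewrite author's own statement) =====
-- stated objective: alternative
-- what changed: Replaces A's flag-guarded accumulate-into-a-list loop plus final join by a structural recursion that builds the output string directly via concatenation, stopping the recursion and joining the untouched tail once the first matplotlib-import line is found.
import Mathlib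
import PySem

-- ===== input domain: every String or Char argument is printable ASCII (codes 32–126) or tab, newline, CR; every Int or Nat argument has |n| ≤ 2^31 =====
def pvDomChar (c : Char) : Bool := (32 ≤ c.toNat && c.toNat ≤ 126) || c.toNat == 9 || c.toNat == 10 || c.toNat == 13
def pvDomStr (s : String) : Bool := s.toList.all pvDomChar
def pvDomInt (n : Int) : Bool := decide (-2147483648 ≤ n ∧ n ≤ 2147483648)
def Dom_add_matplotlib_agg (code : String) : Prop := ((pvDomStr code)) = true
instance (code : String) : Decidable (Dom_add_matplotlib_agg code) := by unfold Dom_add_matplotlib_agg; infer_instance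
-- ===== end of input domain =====

-- B builds the output string directly by structural recursion (no result list, no flag),
-- stopping at the first matplotlib-import line; objective: alternative decomposition.


-- ===== PORT A =====
def pvAggLine : String := "import matplotlib\nmatplotlib.use('Agg')"

def pvIsMplImport (line : String) : Bool :=
  PySem.Str.isIn "matplotlib" line && PySem.Str.isIn "import" line

def pvStepA (st : List String × Bool) (line : String) : List String × Bool :=
  let result := st.1 ++ [line]
  if pvIsMplImport line && !st.2 then
    (result ++ [pvAggLine], true)
  else (result, st.2)

def add_matplotlib_agg (code : String) : String :=
  let lines := PySem.Str.splitlines code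
  let st := lines.foldl pvStepA ([], false)
  PySem.Str.join "\n" st.1

-- ===== PORT B =====
def pvGoB : List String → String
  | [] => ""
  | head :: tail =>
    if pvIsMplImport head then
      let out := head ++ "\n" ++ pvAggLine
      if tail = [] then out else out ++ "\n" ++ PySem.Str.join "\n" tail
    else
      if tail = [] then head else head ++ "\n" ++ pvGoB tail

def add_matplotlib_agg_alt (code : String) : String :=
  pvGoB (PySem.Str.splitlines code)

-- ===== PRECONDITION & SPEC =====
def Spec_add_matplotlib_agg (code : String) (out : String) : Prop := out = add_matplotlib_agg_alt code
instance (code : String) (out : String) : Decidable (Spec_add_matplotlib_agg code out) := by unfold Spec_add_matplotlib_agg; infer_instance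

-- ===== CLAIM (what is proved, stated in full; the proofs are below) =====
def Claim_equal_add_matplotlib_agg : Prop := ∀ (code : String), Dom_add_matplotlib_agg code → Spec_add_matplotlib_agg code (add_matplotlib_agg code)

-- ===== LEMMAS AND PROOFS =====

theorem pvJoin_cons (h : String) (t : List String) :
    PySem.Str.join "\n" (h :: t) = h ++ (if t = [] then "" else "\n" ++ PySem.Str.join "\n" t) := by
  cases t with
  | nil => simp [PySem.Str.join, PySem.Chars.join, List.intercalate]
  | cons b bs =>
    rw [if_neg (List.cons_ne_nil b bs)]
    simp only [PySem.Str.join, PySem.Chars.join]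
    rw [← String.toList_inj]
    simp [List.intercalate]

theorem pvFoldA_true (lines acc : List String) :
    lines.foldl pvStepA (acc, true) = (acc ++ lines, true) := by
  induction lines generalizing acc with
  | nil => simp
  | cons l ls ih => simp [pvStepA, ih]

theorem pvFoldA_acc (lines : List String) (acc : List String) :
    (lines.foldl pvStepA (acc, false)).1 = acc ++ (lines.foldl pvStepA ([], false)).1 := by
  induction lines generalizing acc with
  | nil => simp
  | cons l ls ih =>
    by_cases h : (pvIsMplImport l) = true
    · simp [List.foldl_cons, pvStepA, h, pvFoldA_true]
    · have h' : (pvIsMplImport l) = false := by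
        simpa using h
      have hstep : ∀ a : List String, pvStepA (a, false) l = (a ++ [l], false) := by
        intro a; simp [pvStepA, h']
      rw [List.foldl_cons, List.foldl_cons, hstep, hstep, ih (acc ++ [l]), ih ([] ++ [l])]
      simp

theorem pvFoldA_cons (l : String) (ls : List String) :
    ((l :: ls).foldl pvStepA ([], false)).1 =
      if pvIsMplImport l then
        l :: pvAggLine :: ls
      else l :: (ls.foldl pvStepA ([], false)).1 := by
  by_cases h : (pvIsMplImport l) = true
  · simp [List.foldl_cons, pvStepA, h, pvFoldA_true]
  · have h' : (pvIsMplImport l) = false := by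
      simpa using h
    have hstep : pvStepA ([], false) l = ([l], false) := by simp [pvStepA, h']
    rw [List.foldl_cons, hstep, pvFoldA_acc ls [l]]
    simp [h']

theorem pvFoldA_ne_nil (l : String) (ls : List String) :
    ((l :: ls).foldl pvStepA ([], false)).1 ≠ [] := by
  rw [pvFoldA_cons]; split_ifs <;> simp

theorem pvGoB_eq (lines : List String) :
    pvGoB lines = PySem.Str.join "\n" (lines.foldl pvStepA ([], false)).1 := by
  induction lines with
  | nil => simp [pvGoB, PySem.Str.join, PySem.Chars.join, List.intercalate]
  | cons l ls ih =>
    rw [pvFoldA_cons]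
    by_cases h : (pvIsMplImport l) = true
    · simp only [pvGoB, h, if_true]
      rw [pvJoin_cons, pvJoin_cons]
      cases ls with
      | nil => simp [String.append_assoc]
      | cons b bs => simp [String.append_assoc]
    · have h' : (pvIsMplImport l) = false := by
        simpa using h
      simp only [pvGoB, h', Bool.false_eq_true, if_false]
      rw [pvJoin_cons]
      cases ls with
      | nil => simp
      | cons b bs =>
        have hne := pvFoldA_ne_nil b bs
        rw [if_neg (List.cons_ne_nil b bs), if_neg hne, ih]
        simp [String.append_assoc]

-- ===== VERDICT (by name: the statement is the Claim_ definition above) =====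
theorem add_matplotlib_agg_spec : Claim_equal_add_matplotlib_agg := by
  intro code _
  unfold Spec_add_matplotlib_agg add_matplotlib_agg add_matplotlib_agg_alt
  simp [pvGoB_eq]
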